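-- pv_equiv track=rewrite | github.com/fanzhangg/algorithm-problems | maths/algebraic_structures/multi_table.py | get_multi_table
-- ===== SOURCE A (Python) =====
-- def get_multi_table(nums: list, div: int)->str:
--     """
--     :param nums: a list of numbers
--     :param div: the divisor
--     :return: a markdown format multiplication table of *nums* using multiplication mode *div*
--     """
--     table = []
--     for x in nums:
--         row = []
--         for y in nums:
--             remain = x * y % div
--             row.append(remain)
--         table.append(row)
--
--     s = "| "
--     s += "mod" + str(div) + " | "
--     s += " | ".join([str(n) for n in nums])
--     s += " |\n"
--     s += "| "
--     s += " | ".join("--" for _ in range(len(nums) + 1))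
--     s += " |\n"
--
--     for i in range(len(table)):
--         row_str = str(nums[i]) + " | " + " | ".join([str(n) for n in table[i]])
--         s += "| " + row_str + " |\n"
--     return s
-- ===== SOURCE B (Python) =====
-- def get_multi_table(nums: list, div: int) -> str:
--     """Column-major construction: build the table's columns (label column first,
--     then one product column per y), then transpose by index to emit the rows;
--     all lines are assembled once with a newline join."""
--     cols = [[str(x) for x in nums]]
--     for y in nums:
--         cols.append([str(x * y % div) for x in nums])
--     lines = [
--         "| mod" + str(div) + " | " + " | ".join(str(n) for n in nums) + " |",
--         "| " + " | ".join(["--"] * (len(nums) + 1)) + " |",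
--     ]
--     for i in range(len(nums)):
--         lines.append("| " + " | ".join(c[i] for c in cols) + " |")
--     return "\n".join(lines) + "\n"
-- ===== Notes on version B (the rewrite author's own statement) =====
-- stated objective: alternative
-- what changed: B builds the table column-major (a label column plus one product column per y), then transposes by index to emit each row, assembling all lines with a single newline join, instead of A's row-major table build followed by a separate index loop that re-formats each row with string appends; Pre_ excludes only div=0 with non-empty nums, where both raise ZeroDivisionError.
import Mathlib
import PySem

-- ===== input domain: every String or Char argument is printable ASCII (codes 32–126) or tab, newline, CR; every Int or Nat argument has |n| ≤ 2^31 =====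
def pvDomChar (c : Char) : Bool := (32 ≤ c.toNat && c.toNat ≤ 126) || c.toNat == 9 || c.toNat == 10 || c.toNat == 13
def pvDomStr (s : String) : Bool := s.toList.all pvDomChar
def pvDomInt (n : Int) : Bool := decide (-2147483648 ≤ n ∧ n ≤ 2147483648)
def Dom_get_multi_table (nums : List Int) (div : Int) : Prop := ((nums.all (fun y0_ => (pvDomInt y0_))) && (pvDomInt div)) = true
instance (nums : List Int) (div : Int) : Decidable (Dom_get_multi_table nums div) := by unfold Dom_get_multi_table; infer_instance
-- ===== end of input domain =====

-- B builds the table column-major and transposes by index, joining all lines once (objective: alternative).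


-- ===== PORT A =====
def get_multi_table (nums : List Int) (div : Int) : String :=
  let table := nums.foldl (fun table x =>
    table ++ [nums.foldl (fun row y => row ++ [PySem.Int.mod (x * y) div]) []]) []
  let s := "| "
  let s := s ++ ("mod" ++ PySem.Int.toStr div ++ " | ")
  let s := s ++ PySem.Str.join " | " (nums.map (fun n => PySem.Int.toStr n))
  let s := s ++ " |\n"
  let s := s ++ "| "
  let s := s ++ PySem.Str.join " | " ((List.range (nums.length + 1)).map (fun _ => "--"))
  let s := s ++ " |\n"
  (List.range table.length).foldl (fun s i =>
    let row_str := PySem.Int.toStr (nums.getD i 0) ++ " | " ++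
      PySem.Str.join " | " ((table.getD i []).map (fun n => PySem.Int.toStr n))
    s ++ ("| " ++ row_str ++ " |\n")) s

-- ===== PORT B =====
-- Columns first: the label column, then one product column per y; rows are read
-- off by transposing with the index i (every column has length nums.length, so
-- getD is exact for c[i]); all lines joined once with "\n".
def get_multi_table_alt (nums : List Int) (div : Int) : String :=
  let cols := nums.foldl (fun cols y =>
    cols ++ [nums.map (fun x => PySem.Int.toStr (PySem.Int.mod (x * y) div))])
    [nums.map (fun x => PySem.Int.toStr x)]
  let lines := ["| mod" ++ PySem.Int.toStr div ++ " | " ++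
      PySem.Str.join " | " (nums.map (fun n => PySem.Int.toStr n)) ++ " |",
    "| " ++ PySem.Str.join " | " (List.replicate (nums.length + 1) "--") ++ " |"]
  let lines := (List.range nums.length).foldl (fun lines i =>
    lines ++ ["| " ++ PySem.Str.join " | " (cols.map (fun c => c.getD i "")) ++ " |"]) lines
  PySem.Str.join "\n" lines ++ "\n"

-- ===== PRECONDITION & SPEC =====
-- Pre_ excludes exactly the inputs where both A and B raise ZeroDivisionError: div = 0 with at least one cell.
def Pre_get_multi_table (nums : List Int) (div : Int) : Prop := nums = [] ∨ div ≠ 0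
instance (nums : List Int) (div : Int) : Decidable (Pre_get_multi_table nums div) := by unfold Pre_get_multi_table; infer_instance
def pvWitness_get_multi_table : List Int × Int := ([1, 2, 3], 4)
def Spec_get_multi_table (nums : List Int) (div : Int) (out : String) : Prop := out = get_multi_table_alt nums div
instance (nums : List Int) (div : Int) (out : String) : Decidable (Spec_get_multi_table nums div out) := by unfold Spec_get_multi_table; infer_instance

-- ===== CLAIM (what is proved, stated in full; the proofs are below) =====
def Claim_equal_get_multi_table : Prop := ∀ (nums : List Int) (div : Int), Dom_get_multi_table nums div → Pre_get_multi_table nums div → Spec_get_multi_table nums div (get_multi_table nums div)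

-- ===== LEMMAS AND PROOFS =====

-- Str.join peels off the head when at least two elements remain.
theorem str_join_cons_cons (sep a b : String) (l : List String) :
    PySem.Str.join sep (a :: b :: l) = a ++ sep ++ PySem.Str.join sep (b :: l) := by
  apply String.toList_inj.mp
  simp [PySem.Str.toList_join, String.toList_append, PySem.Chars.join_cons_cons]

-- Str.join with empty separator peels off the head element.
theorem str_join_empty_cons (x : String) (xs : List String) :
    PySem.Str.join "" (x :: xs) = x ++ PySem.Str.join "" xs := by
  apply String.toList_inj.mp
  cases xs <;>
    simp [PySem.Str.toList_join, String.toList_append, PySem.Chars.join_nil,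
      PySem.Chars.join_singleton, PySem.Chars.join_cons_cons]

-- A's accumulator loop over strings is the concatenation of the per-element strings.
theorem foldl_append_str (is : List Nat) (F : Nat → String) :
    ∀ s0 : String, is.foldl (fun s i => s ++ F i) s0 = s0 ++ PySem.Str.join "" (is.map F) := by
  induction is with
  | nil =>
    intro s0
    apply String.toList_inj.mp
    simp [PySem.Str.toList_join, String.toList_append, PySem.Chars.join_nil]
  | cons a tl ih =>
    intro s0
    simp only [List.foldl_cons, List.map_cons, ih, str_join_empty_cons, String.append_assoc]

-- Joining a non-empty list of lines with "\n" and appending a final "\n"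
-- equals concatenating the newline-terminated lines.
theorem join_newline (a : String) (ls : List String) :
    PySem.Str.join "\n" (a :: ls) ++ "\n" = PySem.Str.join "" ((a :: ls).map (· ++ "\n")) := by
  induction ls generalizing a with
  | nil =>
    apply String.toList_inj.mp
    simp [PySem.Str.toList_join, String.toList_append, PySem.Chars.join_singleton]
  | cons b tl ih =>
    rw [str_join_cons_cons, List.map_cons, str_join_empty_cons, ← ih b]
    simp [String.append_assoc]

-- join with a separator peels off the head whenever the tail is non-empty.
theorem str_join_cons_ne (sep a : String) (l : List String) (h : l ≠ []) :
    PySem.Str.join sep (a :: l) = a ++ sep ++ PySem.Str.join sep l := by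
  cases l with
  | nil => exact absurd rfl h
  | cons b tl => exact str_join_cons_cons sep a b tl

-- Reading row i out of the columns gives exactly A's row string (newline-terminated).
theorem rows_eq (nums : List Int) (dv : Int) :
    (List.range nums.length).map (fun i =>
      ("| " ++ PySem.Str.join " | "
        ((nums.map (fun n => PySem.Int.toStr n)).getD i "" ::
          nums.map (fun y =>
            (nums.map (fun x => PySem.Int.toStr (PySem.Int.mod (x * y) dv))).getD i "")) ++ " |") ++ "\n") =
    nums.map (fun x => "| " ++ (PySem.Int.toStr x ++ " | " ++
      PySem.Str.join " | " ((nums.map (fun y => PySem.Int.mod (x * y) dv)).map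
        (fun n => PySem.Int.toStr n))) ++ " |\n") := by
  apply List.ext_getElem
  · simp
  · intro i h1 h2
    simp only [List.length_map] at h2
    have hnil : nums ≠ [] := by
      intro h; subst h; simp at h2
    simp only [List.getElem_map, List.getElem_range]
    have hget : ∀ (g : Int → String),
        (nums.map g).getD i "" = g nums[i] := by
      intro g
      rw [List.getD_eq_getElem _ _ (by simpa using h2), List.getElem_map]
    rw [hget]
    have hcells : nums.map (fun y =>
        (nums.map (fun x => PySem.Int.toStr (PySem.Int.mod (x * y) dv))).getD i "") =
        nums.map (fun y => PySem.Int.toStr (PySem.Int.mod (nums[i] * y) dv)) := by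
      apply List.map_congr_left
      intro y _
      exact hget (fun x => PySem.Int.toStr (PySem.Int.mod (x * y) dv))
    rw [hcells, str_join_cons_ne _ _ _ (by simpa using hnil)]
    have hmerge : (" |" : String) ++ "\n" = " |\n" := rfl
    simp only [String.append_assoc, hmerge, List.map_map, Function.comp_def]

theorem get_multi_table_eq_alt (nums : List Int) (dv : Int) :
    get_multi_table nums dv = get_multi_table_alt nums dv := by
  unfold get_multi_table get_multi_table_alt
  simp only [PySem.List.foldl_append_singleton_eq_map, List.nil_append, foldl_append_str,
    List.length_map, List.map_const', List.length_range, List.cons_append]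
  rw [join_newline]
  simp only [List.map_cons, str_join_empty_cons, List.map_map, Function.comp_def]
  rw [rows_eq nums dv]
  -- convert A's index loop over range(len(table)) into the same map over nums
  have hrows : (List.range nums.length).map (fun i =>
      "| " ++ (PySem.Int.toStr (nums.getD i 0) ++ " | " ++
        PySem.Str.join " | " (((nums.map (fun x =>
          nums.map (fun y => PySem.Int.mod (x * y) dv))).getD i []).map
            (fun n => PySem.Int.toStr n))) ++ " |\n") =
      nums.map (fun x => "| " ++ (PySem.Int.toStr x ++ " | " ++
        PySem.Str.join " | " ((nums.map (fun y => PySem.Int.mod (x * y) dv)).map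
          (fun n => PySem.Int.toStr n))) ++ " |\n") := by
    apply List.ext_getElem
    · simp
    · intro i h1 h2
      simp only [List.length_map] at h2
      simp [List.getElem_range, List.getD_eq_getElem?_getD, List.getElem?_eq_getElem h2,
        List.getElem?_map]
  rw [hrows]
  have h1 : ("| mod" : String) = "| " ++ "mod" := rfl
  have h2 : (" |" : String) ++ "\n" = " |\n" := rfl
  rw [h1]
  simp only [String.append_assoc, h2]

-- ===== VERDICT (by name: the statement is the Claim_ definition above) =====
theorem get_multi_table_spec : Claim_equal_get_multi_table := by
  intro nums dv _ _
  unfold Spec_get_multi_table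
  exact get_multi_table_eq_alt nums dv
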